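-- pv_equiv track=rewrite | github.com/aaronlael/AoC-2021 | AoC_2021_D13.py | buildpaper
-- ===== SOURCE A (Python) =====
-- def buildpaper(coords):
--     xmax = max([x[0] for x in coords]) + 1
--     ymax = max([x[1] for x in coords]) + 1
--     row = ["." for x in range(xmax)]
--     paper = []
--     # I added one here, it fixed the output text and I think I know why...
--     for i in range(ymax + 1):
--         paper.append([x for x in row])
--     for coord in coords:
--         paper[coord[1]][coord[0]] = "#"
--     return paper
-- ===== SOURCE B (Python) =====
-- def buildpaper(coords):
--     xmax = max(x for x, _ in coords) + 1
--     ymax = max(y for _, y in coords) + 1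
--     buckets = [[] for _ in range(ymax + 1)]
--     for x, y in coords:
--         buckets[y].append(x)
--     paper = []
--     for xs in buckets:
--         row = ["."] * xmax
--         for x in xs:
--             row[x] = "#"
--         paper.append(row)
--     return paper
-- ===== Notes on version B (the rewrite author's own statement) =====
-- stated objective: alternative
-- what changed: Instead of filling a blank grid row-by-row and then destructively overwriting single cells of it, B first buckets the x-coordinates by row and then constructs each row exactly once from its bucket, using C-level list repetition for the blank row instead of per-cell comprehension copies.
import Mathlib
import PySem

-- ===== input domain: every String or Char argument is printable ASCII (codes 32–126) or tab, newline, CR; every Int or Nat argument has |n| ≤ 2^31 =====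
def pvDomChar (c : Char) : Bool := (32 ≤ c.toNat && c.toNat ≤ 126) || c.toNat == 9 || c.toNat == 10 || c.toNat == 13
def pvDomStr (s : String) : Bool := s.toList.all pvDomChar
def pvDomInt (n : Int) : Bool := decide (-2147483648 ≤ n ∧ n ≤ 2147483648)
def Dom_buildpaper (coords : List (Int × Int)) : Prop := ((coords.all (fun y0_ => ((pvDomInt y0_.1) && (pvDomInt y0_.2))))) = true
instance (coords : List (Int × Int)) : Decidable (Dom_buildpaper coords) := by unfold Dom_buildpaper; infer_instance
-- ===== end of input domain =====

-- B buckets the x-coordinates by row first and then builds each row exactly once from its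
-- bucket, instead of A's blank-grid-then-overwrite; objective: alternative (same cost).

-- ===== PORT A =====
-- max(...) raises on an empty list; the total '.getD 0' form is exact under Pre_ (coords ≠ []).
-- paper[coord[1]][coord[0]] = "#" is ported with the total pySetD/pyGetD forms, exact under
-- Pre_'s in-range condition (outside it Python raises IndexError).
def buildpaper (coords : List (Int × Int)) : List (List String) :=
  let xmax := (PySem.List.max? (coords.map (fun x => x.1)) (fun v => v)).getD 0 + 1
  let ymax := (PySem.List.max? (coords.map (fun x => x.2)) (fun v => v)).getD 0 + 1
  let row := (PySem.List.pyRange 0 xmax 1).map (fun _ => ".")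
  let paper := (PySem.List.pyRange 0 (ymax + 1) 1).foldl
    (fun p _ => p ++ [row.map (fun x => x)]) []
  coords.foldl (fun p coord =>
    PySem.List.pySetD p coord.2
      (PySem.List.pySetD (PySem.List.pyGetD p coord.2 []) coord.1 "#")) paper

-- ===== PORT B =====
-- same '.getD 0' totalisation of max(...) and the same total pySetD/pyGetD forms for
-- buckets[y].append(x) and row[x] = "#"; exact under Pre_.  '["."] * xmax' is
-- List.replicate xmax.toNat (Python's list repetition: empty for n ≤ 0).
def buildpaper_alt (coords : List (Int × Int)) : List (List String) :=
  let xmax := (PySem.List.max? (coords.map (fun c => c.1)) (fun v => v)).getD 0 + 1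
  let ymax := (PySem.List.max? (coords.map (fun c => c.2)) (fun v => v)).getD 0 + 1
  let buckets0 := (PySem.List.pyRange 0 (ymax + 1) 1).map (fun _ => ([] : List Int))
  let buckets := coords.foldl (fun m c =>
    PySem.List.pySetD m c.2 ((PySem.List.pyGetD m c.2 []) ++ [c.1])) buckets0
  buckets.foldl (fun p xs =>
    p ++ [xs.foldl (fun r x => PySem.List.pySetD r x "#")
            (List.replicate xmax.toNat ".")]) []

-- ===== PRECONDITION & SPEC =====
-- Pre_ excludes exactly the inputs on which the Python A raises: the empty list (max() of an
-- empty sequence, ValueError) and coordinates outside Python's valid (possibly negative) index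
-- range for the grid A builds (IndexError). '-c.1 - 1 ≤ d.1' for some d says c.1 is ≥ minus the
-- row width (= max x + 1), and '-c.2 - 2 ≤ d.2' says c.2 is ≥ minus the row count (= max y + 2).
def Pre_buildpaper (coords : List (Int × Int)) : Prop :=
  coords ≠ [] ∧ ∀ c ∈ coords,
    (∃ d ∈ coords, -c.1 - 1 ≤ d.1) ∧ (∃ d ∈ coords, -c.2 - 2 ≤ d.2)
instance (coords : List (Int × Int)) : Decidable (Pre_buildpaper coords) := by
  unfold Pre_buildpaper; infer_instance
def pvWitness_buildpaper : (List (Int × Int)) := [(0, 0)]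

def Spec_buildpaper (coords : List (Int × Int)) (out : List (List String)) : Prop :=
  out = buildpaper_alt coords
instance (coords : List (Int × Int)) (out : List (List String)) : Decidable (Spec_buildpaper coords out) := by
  unfold Spec_buildpaper; infer_instance

-- ===== CLAIM (what is proved, stated in full; the proofs are below) =====
def Claim_equal_buildpaper : Prop := ∀ (coords : List (Int × Int)), Dom_buildpaper coords → Pre_buildpaper coords → Spec_buildpaper coords (buildpaper coords)

-- ===== LEMMAS AND PROOFS =====

-- "cell P j k": entry of the grid P at row j, column k (a default outside).
def pvCell (P : List (List String)) (j k : Nat) : String := (P.getD j []).getD k ""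

-- One update step of A's marking loop.
def pvMark (p : List (List String)) (c : Int × Int) : List (List String) :=
  PySem.List.pySetD p c.2 (PySem.List.pySetD (PySem.List.pyGetD p c.2 []) c.1 "#")

-- One update step of B's bucketing loop.
def pvPut (m : List (List Int)) (c : Int × Int) : List (List Int) :=
  PySem.List.pySetD m c.2 ((PySem.List.pyGetD m c.2 []) ++ [c.1])

-- Python's in-range (possibly negative) index normalises to the Euclidean remainder.
lemma pv_pyIdx_inrange (n : Nat) (i : Int) (h1 : -(n : Int) ≤ i) (h2 : i < n) :
    PySem.List.pyIdx? n i = some (i % (n : Int)).toNat := by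
  unfold PySem.List.pyIdx?
  by_cases h : 0 ≤ i
  · rw [if_pos h, if_pos h2, Int.emod_eq_of_lt h h2]
  · rw [if_neg h, if_pos h1]
    have he : i % (n : Int) = i + n := by
      rw [← Int.add_mul_emod_self_left (c := 1), mul_one]
      exact Int.emod_eq_of_lt (by omega) (by omega)
    rw [he]
    congr 1
    omega

lemma pv_pySetD_inrange {α : Type} (xs : List α) (i : Int) (v : α)
    (h1 : -(xs.length : Int) ≤ i) (h2 : i < xs.length) :
    PySem.List.pySetD xs i v = xs.set (i % (xs.length : Int)).toNat v := by
  unfold PySem.List.pySetD PySem.List.pySet?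
  rw [pv_pyIdx_inrange _ _ h1 h2]
  rfl

lemma pv_pyGetD_inrange {α : Type} (xs : List α) (i : Int) (d : α)
    (h1 : -(xs.length : Int) ≤ i) (h2 : i < xs.length) :
    PySem.List.pyGetD xs i d = xs.getD (i % (xs.length : Int)).toNat d := by
  unfold PySem.List.pyGetD PySem.List.pyGet?
  rw [pv_pyIdx_inrange _ _ h1 h2, Option.bind_some, List.getD_eq_getElem?_getD]

lemma pv_norm_lt (n : Nat) (i : Int) (hn : 0 < n) : (i % (n : Int)).toNat < n := by
  have := Int.emod_nonneg i (show (n : Int) ≠ 0 by omega)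
  have := Int.emod_lt_of_pos i (show (0 : Int) < n by omega)
  omega

lemma pv_getD_set {α : Type} (xs : List α) (n j : Nat) (v d : α) (hn : n < xs.length) :
    (xs.set n v).getD j d = if n = j then v else xs.getD j d := by
  simp only [List.getD_eq_getElem?_getD, List.getElem?_set]
  by_cases h : n = j
  · rw [if_pos h, if_pos h, if_pos (h ▸ hn), Option.getD_some]
  · rw [if_neg h, if_neg h]

lemma pvMark_shape (p : List (List String)) (c : Int × Int) (W : Nat)
    (hW : ∀ r ∈ p, r.length = W)
    (h3 : -(p.length : Int) ≤ c.2) (h4 : c.2 < p.length) :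
    (pvMark p c).length = p.length ∧ ∀ r ∈ pvMark p c, r.length = W := by
  unfold pvMark
  rw [pv_pySetD_inrange _ _ _ h3 h4, pv_pyGetD_inrange _ _ _ h3 h4]
  refine ⟨List.length_set, ?_⟩
  intro r hr
  have hplen : 0 < p.length := by omega
  have hn : (c.2 % (p.length : Int)).toNat < p.length := pv_norm_lt _ _ hplen
  rcases List.mem_or_eq_of_mem_set hr with h | h
  · exact hW r h
  · subst h
    rw [PySem.List.length_pySetD, List.getD_eq_getElem _ _ hn]
    exact hW _ (List.getElem_mem hn)

lemma pvMark_cell (p : List (List String)) (c : Int × Int) (j k : Nat) (W : Nat)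
    (hW : ∀ r ∈ p, r.length = W)
    (h1 : -(W : Int) ≤ c.1) (h2 : c.1 < W)
    (h3 : -(p.length : Int) ≤ c.2) (h4 : c.2 < p.length) :
    pvCell (pvMark p c) j k =
      if (c.1 % (W : Int)).toNat = k ∧ (c.2 % (p.length : Int)).toNat = j then "#" else pvCell p j k := by
  have hplen : 0 < p.length := by omega
  have hWpos : 0 < W := by omega
  have hnlt : (c.2 % (p.length : Int)).toNat < p.length := pv_norm_lt _ _ hplen
  have hrowlen : (p.getD (c.2 % (p.length : Int)).toNat []).length = W := by
    rw [List.getD_eq_getElem _ _ hnlt]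
    exact hW _ (List.getElem_mem hnlt)
  have hmlt : (c.1 % (W : Int)).toNat < W := pv_norm_lt _ _ hWpos
  unfold pvMark pvCell
  rw [pv_pySetD_inrange _ _ _ h3 h4, pv_pyGetD_inrange _ _ _ h3 h4,
      pv_pySetD_inrange _ _ _ (by rw [hrowlen]; exact h1) (by rw [hrowlen]; exact h2),
      hrowlen]
  simp only [List.getD_eq_getElem?_getD, List.getElem?_set]
  by_cases hj : (c.2 % (p.length : Int)).toNat = j
  · rw [if_pos hj, if_pos (hj ▸ hnlt), Option.getD_some, List.getElem?_set]
    rw [List.getD_eq_getElem?_getD] at hrowlen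
    by_cases hk : (c.1 % (W : Int)).toNat = k
    · rw [if_pos hk, if_pos (by rw [hrowlen]; exact hmlt), if_pos ⟨hk, hj⟩]
      rfl
    · rw [if_neg hk, if_neg (fun h => hk h.1), ← hj]
  · rw [if_neg hj, if_neg (fun h => hj h.2)]

-- The whole marking loop of A, cell-wise: a cell is "#" iff some coordinate normalises to it.
lemma pvFold_cells (cs : List (Int × Int)) (P : List (List String)) (W : Nat)
    (hW : ∀ r ∈ P, r.length = W)
    (hin : ∀ c ∈ cs, -(W : Int) ≤ c.1 ∧ c.1 < W ∧ -(P.length : Int) ≤ c.2 ∧ c.2 < P.length) :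
    (cs.foldl pvMark P).length = P.length ∧ (∀ r ∈ cs.foldl pvMark P, r.length = W) ∧
    ∀ j k : Nat, pvCell (cs.foldl pvMark P) j k =
      if ∃ c ∈ cs, (c.1 % (W : Int)).toNat = k ∧ (c.2 % (P.length : Int)).toNat = j
      then "#" else pvCell P j k := by
  induction cs generalizing P with
  | nil => exact ⟨rfl, hW, fun j k => by simp⟩
  | cons c cs ih =>
    obtain ⟨h1, h2, h3, h4⟩ := hin c (List.mem_cons_self)
    obtain ⟨hlen, hrows⟩ := pvMark_shape P c W hW h3 h4
    have hin' : ∀ d ∈ cs, -(W : Int) ≤ d.1 ∧ d.1 < W ∧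
        -((pvMark P c).length : Int) ≤ d.2 ∧ d.2 < (pvMark P c).length := by
      intro d hd
      obtain ⟨a, b, cc, dd⟩ := hin d (List.mem_cons_of_mem _ hd)
      refine ⟨a, b, by rw [hlen]; exact cc, by rw [hlen]; exact dd⟩
    obtain ⟨l1, l2, l3⟩ := ih (pvMark P c) hrows hin'
    refine ⟨by rw [List.foldl_cons, l1, hlen], by rw [List.foldl_cons] at *; exact l2, ?_⟩
    intro j k
    rw [List.foldl_cons, l3 j k, pvMark_cell P c j k W hW h1 h2 h3 h4, hlen]
    by_cases hmem : ∃ d ∈ cs, (d.1 % (W : Int)).toNat = k ∧ (d.2 % (P.length : Int)).toNat = j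
    · rw [if_pos hmem, if_pos (by obtain ⟨d, hd, hdd⟩ := hmem
                                  exact ⟨d, List.mem_cons_of_mem _ hd, hdd⟩)]
    · rw [if_neg hmem]
      by_cases hhit : (c.1 % (W : Int)).toNat = k ∧ (c.2 % (P.length : Int)).toNat = j
      · rw [if_pos hhit, if_pos ⟨c, List.mem_cons_self, hhit⟩]
      · rw [if_neg hhit, if_neg (by
          rintro ⟨d, hd, hdd⟩
          rcases List.mem_cons.mp hd with h | h
          · exact hhit (h ▸ hdd)
          · exact hmem ⟨d, h, hdd⟩)]

-- B's bucketing loop: bucket j collects, in order, the x's of the coordinates whose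
-- (normalised) y is j.
lemma pvBucket_fold (cs : List (Int × Int)) (m : List (List Int)) (H : Nat) (hm : m.length = H)
    (hin : ∀ c ∈ cs, -(H : Int) ≤ c.2 ∧ c.2 < H) :
    (cs.foldl pvPut m).length = H ∧
    ∀ j : Nat, j < H → (cs.foldl pvPut m).getD j [] =
      m.getD j [] ++ (cs.filter (fun c => decide ((c.2 % (H : Int)).toNat = j))).map (fun c => c.1) := by
  induction cs generalizing m with
  | nil => exact ⟨hm, fun j _ => by simp⟩
  | cons c cs ih =>
    obtain ⟨h3, h4⟩ := hin c (List.mem_cons_self)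
    have hHpos : 0 < H := by omega
    have hnlt : (c.2 % (H : Int)).toNat < H := pv_norm_lt _ _ hHpos
    have hstep : pvPut m c = m.set (c.2 % (H : Int)).toNat (m.getD (c.2 % (H : Int)).toNat [] ++ [c.1]) := by
      unfold pvPut
      rw [pv_pySetD_inrange _ _ _ (by rw [hm]; exact h3) (by rw [hm]; exact h4),
          pv_pyGetD_inrange _ _ _ (by rw [hm]; exact h3) (by rw [hm]; exact h4), hm]
    have hlen' : (pvPut m c).length = H := by rw [hstep, List.length_set, hm]
    obtain ⟨l1, l2⟩ := ih (pvPut m c) hlen' (fun d hd => hin d (List.mem_cons_of_mem _ hd))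
    refine ⟨by rw [List.foldl_cons]; exact l1, ?_⟩
    intro j hj
    rw [List.foldl_cons, l2 j hj, hstep]
    have hget : (m.set (c.2 % (H : Int)).toNat (m.getD (c.2 % (H : Int)).toNat [] ++ [c.1])).getD j [] =
        if (c.2 % (H : Int)).toNat = j then m.getD j [] ++ [c.1] else m.getD j [] := by
      rw [pv_getD_set _ _ _ _ _ (by rw [hm]; exact hnlt)]
      by_cases hjj : (c.2 % (H : Int)).toNat = j
      · rw [if_pos hjj, if_pos hjj, hjj]
      · rw [if_neg hjj, if_neg hjj]
    rw [hget, List.filter_cons]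
    by_cases hjj : (c.2 % (H : Int)).toNat = j
    · rw [if_pos hjj, if_pos (by simpa using hjj)]
      simp
    · rw [if_neg hjj, if_neg (by simpa using hjj)]

-- B's row loop: a row cell is "#" iff some x of the bucket normalises to it.
lemma pvRow_fold (xs : List Int) (row : List String) (W : Nat) (hrow : row.length = W)
    (hin : ∀ x ∈ xs, -(W : Int) ≤ x ∧ x < W) :
    (xs.foldl (fun r x => PySem.List.pySetD r x "#") row).length = W ∧
    ∀ k : Nat, k < W → (xs.foldl (fun r x => PySem.List.pySetD r x "#") row).getD k "" =
      if ∃ x ∈ xs, (x % (W : Int)).toNat = k then "#" else row.getD k "" := by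
  induction xs generalizing row with
  | nil => exact ⟨hrow, fun k _ => by simp⟩
  | cons x xs ih =>
    obtain ⟨h1, h2⟩ := hin x (List.mem_cons_self)
    have hWpos : 0 < W := by omega
    have hnlt : (x % (W : Int)).toNat < W := pv_norm_lt _ _ hWpos
    have hstep : PySem.List.pySetD row x "#" = row.set (x % (W : Int)).toNat "#" := by
      rw [pv_pySetD_inrange _ _ _ (by rw [hrow]; exact h1) (by rw [hrow]; exact h2), hrow]
    have hlen' : (PySem.List.pySetD row x "#").length = W := by
      rw [hstep, List.length_set, hrow]
    obtain ⟨l1, l2⟩ := ih (PySem.List.pySetD row x "#") hlen'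
      (fun y hy => hin y (List.mem_cons_of_mem _ hy))
    refine ⟨by rw [List.foldl_cons]; exact l1, ?_⟩
    intro k hk
    rw [List.foldl_cons, l2 k hk, hstep]
    have hget : (row.set (x % (W : Int)).toNat "#").getD k "" =
        if (x % (W : Int)).toNat = k then "#" else row.getD k "" := by
      rw [pv_getD_set _ _ _ _ _ (by rw [hrow]; exact hnlt)]
    rw [hget]
    by_cases hmem : ∃ y ∈ xs, (y % (W : Int)).toNat = k
    · obtain ⟨y, hy, hyy⟩ := hmem
      rw [if_pos ⟨y, hy, hyy⟩, if_pos ⟨y, List.mem_cons_of_mem _ hy, hyy⟩]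
    · rw [if_neg hmem]
      by_cases hhit : (x % (W : Int)).toNat = k
      · rw [if_pos hhit, if_pos ⟨x, List.mem_cons_self, hhit⟩]
      · rw [if_neg hhit, if_neg (by
          rintro ⟨y, hy, hyy⟩
          rcases List.mem_cons.mp hy with h | h
          · exact hhit (h ▸ hyy)
          · exact hmem ⟨y, h, hyy⟩)]

-- Cell of a grid built by mapping over a range.
lemma pvCell_map_pyRange {β : Type} (f : Int → β) (n : Int) (d : β) (j : Nat) (hj : (j : Int) < n) :
    ((PySem.List.pyRange 0 n 1).map f).getD j d = f j := by
  have h0 : 0 ≤ (j : Int) := Int.natCast_nonneg j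
  have : j < ((PySem.List.pyRange 0 n 1).map f).length := by
    rw [List.length_map, PySem.List.length_pyRange_one]; omega
  rw [List.getD_eq_getElem _ _ this, List.getElem_map, PySem.List.getElem_pyRange_one]
  norm_num

-- ===== VERDICT (by name: the statement is the Claim_ definition above) =====
theorem buildpaper_spec : Claim_equal_buildpaper := by
  intro coords _ hpre
  obtain ⟨hne, hbound⟩ := hpre
  -- the maxima exist
  obtain ⟨mx, hmx⟩ : ∃ m, PySem.List.max? (coords.map (fun x => x.1)) (fun v => v) = some m := by
    cases h : PySem.List.max? (coords.map (fun x => x.1)) (fun v => v) with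
    | none => exact absurd (by simpa using (PySem.List.max?_eq_none_iff _ _).mp h) hne
    | some m => exact ⟨m, rfl⟩
  obtain ⟨my, hmy⟩ : ∃ m, PySem.List.max? (coords.map (fun x => x.2)) (fun v => v) = some m := by
    cases h : PySem.List.max? (coords.map (fun x => x.2)) (fun v => v) with
    | none => exact absurd (by simpa using (PySem.List.max?_eq_none_iff _ _).mp h) hne
    | some m => exact ⟨m, rfl⟩
  have hmx_ge : ∀ c ∈ coords, c.1 ≤ mx := fun c hc =>
    PySem.List.max?_isMax hmx c.1 (List.mem_map_of_mem hc)
  have hmy_ge : ∀ c ∈ coords, c.2 ≤ my := fun c hc =>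
    PySem.List.max?_isMax hmy c.2 (List.mem_map_of_mem hc)
  have hmx0 : 0 ≤ mx := by
    obtain ⟨c, hc, hcx⟩ := List.mem_map.mp (PySem.List.max?_mem hmx)
    obtain ⟨⟨d, hd, hdx⟩, -⟩ := hbound c hc
    have := hmx_ge d hd
    omega
  have hmy1 : -1 ≤ my := by
    obtain ⟨c, hc, hcy⟩ := List.mem_map.mp (PySem.List.max?_mem hmy)
    obtain ⟨-, ⟨d, hd, hdy⟩⟩ := hbound c hc
    have := hmy_ge d hd
    omega
  show buildpaper coords = buildpaper_alt coords
  unfold buildpaper buildpaper_alt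
  simp only [hmx, hmy, Option.getD_some]
  set W : Nat := (mx + 1).toNat with hWdef
  set H : Nat := (my + 2).toNat with hHdef
  have hWI : (W : Int) = mx + 1 := by omega
  have hHI : (H : Int) = my + 1 + 1 := by omega
  set row : List String := (PySem.List.pyRange 0 (mx + 1) 1).map (fun _ => ".") with hrow
  have hrowlen : row.length = W := by
    rw [hrow, List.length_map, PySem.List.length_pyRange_one]; omega
  have hpaper0 : (PySem.List.pyRange 0 (my + 1 + 1) 1).foldl
      (fun p _ => p ++ [row.map (fun x => x)]) [] =
      (PySem.List.pyRange 0 (my + 1 + 1) 1).map (fun _ => row) := by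
    rw [PySem.List.foldl_append_singleton_eq_map (fun _ => row.map (fun x => x)), List.nil_append]
    simp
  rw [show (fun (p : List (List String)) (_ : Int) => p ++ [row.map fun x => x]) =
        (fun acc x => acc ++ [(fun _ => row.map fun x => x) x]) from rfl, hpaper0]
  set P0 : List (List String) := (PySem.List.pyRange 0 (my + 1 + 1) 1).map (fun _ => row) with hP0
  rw [show (fun p (coord : Int × Int) =>
        PySem.List.pySetD p coord.2
          (PySem.List.pySetD (PySem.List.pyGetD p coord.2 []) coord.1 "#")) = pvMark from rfl]
  rw [show (fun m (c : Int × Int) =>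
        PySem.List.pySetD m c.2 ((PySem.List.pyGetD m c.2 []) ++ [c.1])) = pvPut from rfl]
  have hP0len : P0.length = H := by
    rw [hP0, List.length_map, PySem.List.length_pyRange_one]; omega
  have hP0rows : ∀ r ∈ P0, r.length = W := by
    intro r hr
    obtain ⟨_, _, hx⟩ := List.mem_map.mp hr
    rw [← hx, hrowlen]
  have hin : ∀ c ∈ coords, -(W : Int) ≤ c.1 ∧ c.1 < W ∧
      -(P0.length : Int) ≤ c.2 ∧ c.2 < P0.length := by
    intro c hc
    obtain ⟨⟨d, hd, hdx⟩, ⟨e, he, hey⟩⟩ := hbound c hc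
    have hdm := hmx_ge d hd
    have hem := hmy_ge e he
    have h1 := hmx_ge c hc
    have h2 := hmy_ge c hc
    rw [hP0len]
    refine ⟨by omega, by omega, by omega, by omega⟩
  obtain ⟨hQlen, hQrows, hQcell⟩ := pvFold_cells coords P0 W hP0rows hin
  -- B: buckets
  set B0 : List (List Int) := (PySem.List.pyRange 0 (my + 1 + 1) 1).map (fun _ => ([] : List Int)) with hB0
  have hB0len : B0.length = H := by
    rw [hB0, List.length_map, PySem.List.length_pyRange_one]; omega
  have hinY : ∀ c ∈ coords, -(H : Int) ≤ c.2 ∧ c.2 < H := by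
    intro c hc
    obtain ⟨-, -, a, b⟩ := hin c hc
    rw [hP0len] at a b
    exact ⟨a, b⟩
  obtain ⟨hBlen, hBget⟩ := pvBucket_fold coords B0 H hB0len hinY
  set buckets : List (List Int) := coords.foldl pvPut B0 with hbuckets
  have hB0get : ∀ j : Nat, j < H → B0.getD j [] = [] := by
    intro j hj
    rw [hB0, pvCell_map_pyRange _ _ _ _ (by omega)]
  -- B's final fold = map of the row builder over the buckets
  have hWrep : List.replicate (mx + 1).toNat "." = List.replicate W "." := by rw [hWdef]
  rw [hWrep]
  have hBfin : buckets.foldl (fun p xs =>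
      p ++ [List.foldl (fun r x => PySem.List.pySetD r x "#") (List.replicate W ".") xs]) [] =
      buckets.map (fun xs => List.foldl (fun r x => PySem.List.pySetD r x "#") (List.replicate W ".")
        xs) := by
    rw [PySem.List.foldl_append_singleton_eq_map
      (fun xs : List Int => List.foldl (fun r x => PySem.List.pySetD r x "#") (List.replicate W ".") xs),
      List.nil_append]
  rw [hBfin]
  set rowf : List Int → List String :=
    fun xs => List.foldl (fun r x => PySem.List.pySetD r x "#") (List.replicate W ".") xs with hrowf
  -- bucket elements are in x-range
  have hbin : ∀ j : Nat, j < H → ∀ x ∈ buckets.getD j [], -(W : Int) ≤ x ∧ x < W := by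
    intro j hj x hx
    rw [hBget j hj, hB0get j hj, List.nil_append] at hx
    obtain ⟨c, hc, hcx⟩ := List.mem_map.mp hx
    obtain ⟨a, b, -, -⟩ := hin c (List.mem_filter.mp hc).1
    exact ⟨hcx ▸ a, hcx ▸ b⟩
  -- both sides cell by cell
  apply List.ext_getElem
  · rw [hQlen, hP0len, List.length_map, hBlen]
  intro j hj1 hj2
  have hjH : j < H := by rwa [hQlen, hP0len] at hj1
  have hjB : j < buckets.length := by rw [hBlen]; exact hjH
  have hbj : buckets[j] = buckets.getD j [] := (List.getD_eq_getElem _ _ hjB).symm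
  obtain ⟨hRlen, hRget⟩ := pvRow_fold (buckets.getD j []) (List.replicate W ".") W
    (List.length_replicate) (hbin j hjH)
  have hmapj : (buckets.map rowf)[j] = rowf (buckets.getD j []) := by
    rw [List.getElem_map, hbj]
  apply List.ext_getElem
  · have := hQrows _ (List.getElem_mem hj1)
    rw [this, hmapj, hrowf]
    exact hRlen.symm
  intro k hk1 hk2
  have hkW : k < W := by rwa [hQrows _ (List.getElem_mem hj1)] at hk1
  have hcellQ : (coords.foldl pvMark P0)[j][k] = pvCell (coords.foldl pvMark P0) j k := by
    unfold pvCell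
    rw [List.getD_eq_getElem _ _ hj1, List.getD_eq_getElem _ _ hk1]
  have hcell0 : pvCell P0 j k = "." := by
    unfold pvCell
    rw [hP0, pvCell_map_pyRange _ _ _ _ (by omega), hrow,
        pvCell_map_pyRange _ _ _ _ (by omega)]
  have hkR : k < (rowf (buckets.getD j [])).length := by rw [hrowf]; rw [hRlen]; exact hkW
  have hcellB : (buckets.map rowf)[j][k] = (rowf (buckets.getD j [])).getD k "" := by
    calc (buckets.map rowf)[j][k]
        = ((buckets.map rowf)[j]).getD k "" := (List.getD_eq_getElem _ _ hk2).symm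
      _ = (rowf (buckets.getD j [])).getD k "" := by rw [hmapj]
  have hrep : (List.replicate W ".").getD k "" = "." := by
    rw [List.getD_eq_getElem _ _ (by simpa using hkW), List.getElem_replicate]
  rw [hcellQ, hQcell j k, hcellB, hrowf, hRget k hkW, hcell0, hrep, hBget j hjH, hB0get j hjH,
      List.nil_append]
  have hcond : (∃ x ∈ (coords.filter (fun c => decide ((c.2 % (H : Int)).toNat = j))).map (fun c => c.1),
      (x % (W : Int)).toNat = k) ↔
      (∃ c ∈ coords, (c.1 % (W : Int)).toNat = k ∧ (c.2 % (P0.length : Int)).toNat = j) := by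
    rw [hP0len]
    constructor
    · rintro ⟨x, hx, hxx⟩
      obtain ⟨c, hc, hcx⟩ := List.mem_map.mp hx
      obtain ⟨hc1, hc2⟩ := List.mem_filter.mp hc
      exact ⟨c, hc1, hcx ▸ hxx, by simpa using hc2⟩
    · rintro ⟨c, hc, h1, h2⟩
      exact ⟨c.1, List.mem_map.mpr ⟨c, List.mem_filter.mpr ⟨hc, by simpa using h2⟩, rfl⟩, h1⟩
  by_cases hE : ∃ c ∈ coords, (c.1 % (W : Int)).toNat = k ∧ (c.2 % (P0.length : Int)).toNat = j
  · rw [if_pos hE, if_pos (hcond.mpr hE)]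
  · rw [if_neg hE, if_neg (fun h => hE (hcond.mp h))]
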